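-- pv_equiv track=rewrite | github.com/SIAnalytics/siatune | siatune/utils/args.py | reference_raw_args
-- ===== SOURCE A (Python) =====
-- from typing import List, Tuple
--
-- def reference_raw_args(raw_args: List[str], key: str) -> Tuple:
--     """Extract the list of arguments and their indices from a list of command-
--     line arguments.
--
--     The list of arguments is considered
--     to start after the first occurrence of the given key
--     and to end at the next occurrence
--     of a key (a string starting with '--').
--
--     Args:
--         raw_args (List[str]): List of command-line arguments.
--         key (str):
--             Key to look for in the raw arguments.
--             The key should start with '--'.
--
--     Returns:
--         Tuple[List[str], List[int]]: The list of arguments and their indices.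
--     """
--     assert key.startswith('--')
--     ret: List[str] = []
--     ret_indices: List[int] = []
--     if key not in raw_args:
--         return ret, ret_indices
--     for idx in range(raw_args.index(key) + 1, len(raw_args)):
--         cand = raw_args[idx]
--         if cand.startswith('--'):
--             break
--         ret.append(cand)
--         ret_indices.append(idx)
--     return ret, ret_indices
-- ===== SOURCE B (Python) =====
-- from typing import List, Tuple
--
-- def reference_raw_args(raw_args: List[str], key: str) -> Tuple:
--     assert key.startswith('--')
--     if key not in raw_args:
--         return [], []
--     start = raw_args.index(key) + 1
--     tail = raw_args[start:]
--     n = next((t for t, a in enumerate(tail) if a.startswith('--')), len(tail))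
--     return tail[:n], list(range(start, start + n))
-- ===== Notes on version B (the rewrite author's own statement) =====
-- stated objective: alternative
-- what changed: B locates the slice boundaries once (index of key, then the offset of the next '--' flag) and builds both results in closed form as a slice and a range, instead of A's element-by-element loop appending to two parallel accumulator lists.
import Mathlib
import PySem

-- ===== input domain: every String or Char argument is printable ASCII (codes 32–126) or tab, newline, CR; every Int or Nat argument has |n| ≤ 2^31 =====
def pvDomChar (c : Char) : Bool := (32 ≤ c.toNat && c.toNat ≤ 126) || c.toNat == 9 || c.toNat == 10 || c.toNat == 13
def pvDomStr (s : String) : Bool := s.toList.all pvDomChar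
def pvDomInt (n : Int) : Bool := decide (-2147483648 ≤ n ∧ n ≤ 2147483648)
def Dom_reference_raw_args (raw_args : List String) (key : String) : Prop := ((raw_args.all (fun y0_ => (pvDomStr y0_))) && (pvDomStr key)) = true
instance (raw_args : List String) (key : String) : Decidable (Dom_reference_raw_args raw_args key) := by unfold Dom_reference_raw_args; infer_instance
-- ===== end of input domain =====

-- B builds the result as a slice plus a closed-form range after locating the next-flag
-- boundary, instead of A's per-element loop with two accumulator lists (objective: alternative).
-- ===== PORT A =====
-- A's for-loop over range(index+1, len): iterate over the remaining elements carrying idx,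
-- 'break' = stop returning the accumulated (here: cons-built) lists.
def pvALoop : List String → Int → List String × List Int
  | [], _ => ([], [])
  | cand :: rest, idx =>
    if PySem.Str.startswith cand "--" then ([], [])
    else
      let p := pvALoop rest (idx + 1)
      (cand :: p.1, idx :: p.2)

def reference_raw_args (raw_args : List String) (key : String) : List String × List Int :=
  if key ∈ raw_args then
    match PySem.List.index? raw_args key with
    | some i => pvALoop (raw_args.drop (i + 1)) ((i : Int) + 1)
    | none => ([], [])
  else ([], [])

-- ===== PORT B =====
def reference_raw_args_alt (raw_args : List String) (key : String) : List String × List Int :=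
  if key ∈ raw_args then
    match PySem.List.index? raw_args key with
    | some i =>
      let start : Int := (i : Int) + 1
      let tail := raw_args.drop (i + 1)   -- raw_args[start:] with start = index+1 ≥ 0
      let n := tail.findIdx (fun a => PySem.Str.startswith a "--")  -- next(…, len(tail))
      (tail.take n, PySem.List.pyRange start (start + n) 1)
    | none => ([], [])
  else ([], [])

-- ===== PRECONDITION & SPEC =====
-- A raises AssertionError unless key starts with '--'; exactly those inputs are excluded.
def Pre_reference_raw_args (raw_args : List String) (key : String) : Prop :=
  PySem.Str.startswith key "--" = true
instance (raw_args : List String) (key : String) : Decidable (Pre_reference_raw_args raw_args key) := by unfold Pre_reference_raw_args; infer_instance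
def pvWitness_reference_raw_args : List String × String := (["--opt", "1", "2", "--next"], "--opt")

def Spec_reference_raw_args (raw_args : List String) (key : String) (out : List String × List Int) : Prop := out = reference_raw_args_alt raw_args key
instance (raw_args : List String) (key : String) (out : List String × List Int) : Decidable (Spec_reference_raw_args raw_args key out) := by unfold Spec_reference_raw_args; infer_instance

-- ===== CLAIM (what is proved, stated in full; the proofs are below) =====
def Claim_equal_reference_raw_args : Prop := ∀ (raw_args : List String) (key : String), Dom_reference_raw_args raw_args key → Pre_reference_raw_args raw_args key → Spec_reference_raw_args raw_args key (reference_raw_args raw_args key)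

-- ===== LEMMAS AND PROOFS =====
theorem pvALoop_eq (tail : List String) : ∀ (idx : Int),
    pvALoop tail idx =
      (tail.take (tail.findIdx (fun a => PySem.Str.startswith a "--")),
       PySem.List.pyRange idx (idx + tail.findIdx (fun a => PySem.Str.startswith a "--")) 1) := by
  induction tail with
  | nil =>
    intro idx
    simp [pvALoop, PySem.List.pyRange_one_eq_nil]
  | cons c rest ih =>
    intro idx
    by_cases hp : PySem.Str.startswith c "--" = true
    · have hp' : PySem.Chars.startswith c.toList ['-', '-'] = true := by simpa using hp
      simp [pvALoop, hp', List.findIdx_cons, PySem.List.pyRange_one_eq_nil]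
    · have hb : PySem.Chars.startswith c.toList "--".toList = false := by
        rw [show ("--" : String).toList = ['-', '-'] from rfl]; simpa using hp
      have hlt : idx < idx + ((rest.findIdx (fun a => PySem.Chars.startswith a.toList "--".toList) : Int) + 1) := by
        have : (0:Int) ≤ (rest.findIdx (fun a => PySem.Chars.startswith a.toList "--".toList) : Int) :=
          Int.natCast_nonneg _
        omega
      have heq : ∀ k : Int, idx + 1 + k = idx + (k + 1) := by intro k; ring
      simp only [pvALoop, List.findIdx_cons, PySem.Str.startswith_eq, hb,
        Bool.false_eq_true, if_false, cond_false, ih (idx + 1), List.take_succ_cons,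
        Nat.cast_add, Nat.cast_one]
      rw [heq]
      conv_rhs => rw [PySem.List.pyRange_one_cons hlt]

-- ===== VERDICT (by name: the statement is the Claim_ definition above) =====
theorem reference_raw_args_spec : Claim_equal_reference_raw_args := by
  intro raw_args key _ _
  unfold Spec_reference_raw_args reference_raw_args reference_raw_args_alt
  by_cases hmem : key ∈ raw_args
  · simp only [hmem, if_pos]
    cases h : PySem.List.index? raw_args key with
    | none => rfl
    | some i => simpa using pvALoop_eq (raw_args.drop (i + 1)) ((i : Int) + 1)
  · simp [hmem]
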